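-- pv_equiv track=rewrite | github.com/raogma/Python | 02-Fundamentals/03.More Exercise/06. Dictionaries/02. Judge.py | printing
-- ===== SOURCE A (Python) =====
-- def calculate_points(iterable):
--     res = {}
--     for key in iterable:              # len's not working properly
--         for subkey in iterable[key]:
--             if subkey not in res:
--                 res[subkey] = iterable[key][subkey]
--             else:
--                 res[subkey] += iterable[key][subkey]
--     return res
--
-- def printing(iterable):
--     res = str()
--     for key in iterable:
--         count = 0
--         res += f'{key}: {len(iterable[key])} participants\n'
--         for subkey in dict(sorted(iterable[key].items(), key=lambda el: (-el[1], el[0]))):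
--             count += 1
--             res += f'{count}. {subkey} <::> {iterable[key][subkey]}\n'
--
--     users = calculate_points(iterable)
--     res += f'Individual standings:\n'
--     count = 0
--     for user in dict(sorted(users.items(), key=lambda el: (-el[1], el[0]))):
--         count += 1
--         res += f'{count}. {user} -> {users[user]}\n'
--
--     return res
-- ===== SOURCE B (Python) =====
-- def printing(iterable):
--     lines = []
--     for contest, parts in iterable.items():
--         ranked = sorted(parts.items(), key=lambda el: (-el[1], el[0]))
--         lines += [f'{contest}: {len(ranked)} participants\n']
--         lines += [f'{i}. {name} <::> {pts}\n' for i, (name, pts) in enumerate(ranked, 1)]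
--     # aggregate per-user totals with a sort-then-scan instead of a dict:
--     # sort all (name, points) pairs by name so equal names are adjacent,
--     # then walk the pairs back-to-front, so the current run's total sits at the head
--     pairs = sorted([item for contest, parts in iterable.items() for item in parts.items()],
--                    key=lambda el: el[0])
--     totals = []
--     for name, pts in reversed(pairs):
--         if totals and totals[0][0] == name:
--             totals[0] = (name, pts + totals[0][1])
--         else:
--             totals.insert(0, (name, pts))
--     totals.sort(key=lambda el: (-el[1], el[0]))
--     lines += ['Individual standings:\n']
--     lines += [f'{i}. {name} -> {pts}\n' for i, (name, pts) in enumerate(totals, 1)]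
--     return ''.join(lines)
-- ===== Notes on version B (the rewrite author's own statement) =====
-- stated objective: alternative
-- what changed: B replaces A's dict-based aggregation pass (calculate_points) with a sort-then-scan: it flattens all (name, points) pairs, sorts them by name so equal names are adjacent, and folds adjacent runs into totals built back-to-front, then sorts the totals by (-points, name); the report is built as a list of lines joined once instead of repeated string concatenation.
import Mathlib
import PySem

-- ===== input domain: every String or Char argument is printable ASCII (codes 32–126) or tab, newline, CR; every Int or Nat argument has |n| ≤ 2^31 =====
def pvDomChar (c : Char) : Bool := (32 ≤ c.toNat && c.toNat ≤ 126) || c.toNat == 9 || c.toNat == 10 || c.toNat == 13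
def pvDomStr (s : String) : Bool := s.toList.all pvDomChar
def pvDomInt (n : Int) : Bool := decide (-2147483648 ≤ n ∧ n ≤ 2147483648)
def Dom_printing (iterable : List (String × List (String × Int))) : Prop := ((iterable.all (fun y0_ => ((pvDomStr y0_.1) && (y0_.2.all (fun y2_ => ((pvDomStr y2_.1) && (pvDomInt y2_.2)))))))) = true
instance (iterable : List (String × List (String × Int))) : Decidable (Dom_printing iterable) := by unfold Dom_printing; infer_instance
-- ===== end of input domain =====

-- B replaces A's dict aggregation with a dict-free sort-then-scan (sort all pairs by name,
-- fold adjacent runs built back-to-front) and joins a list of lines once (objective: alternative).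

-- ===== PORT A =====
-- A's parameter is a Python dict of dicts; it arrives here as the association list of its
-- items (keys unique under Pre_printing), so 'for key in iterable' walks the pairs and the
-- lookups 'iterable[key][subkey]' / 'users[user]' are ported as PySem.Dict lookups (the
-- default 0 of getD is unreachable: the looked-up key is always present).
-- Strings are accumulated as List Char (PySem.Chars side) and packed at the end.
def calculate_points (iterable : List (String × List (String × Int))) : PySem.Dict String Int :=
  iterable.foldl (fun res kv =>
    kv.2.foldl (fun res sv =>
      if !res.contains sv.1 then res.insert sv.1 ((PySem.Dict.mk kv.2).getD sv.1 0)
      else res.modify sv.1 0 (· + (PySem.Dict.mk kv.2).getD sv.1 0)) res) PySem.Dict.empty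

def printing (iterable : List (String × List (String × Int))) : String :=
  let res : List Char :=
    iterable.foldl (fun res kv =>
      let res := res ++ kv.1.toList ++ (": ").toList
        ++ PySem.Int.toChars ((PySem.Dict.mk kv.2).size) ++ (" participants\n").toList
      ((PySem.List.sorted2 kv.2 (fun el => -el.2) (fun el => el.1)).foldl
        (fun (st : List Char × Int) sv =>
          (st.1 ++ PySem.Int.toChars (st.2 + 1) ++ (". ").toList ++ sv.1.toList
             ++ (" <::> ").toList ++ PySem.Int.toChars ((PySem.Dict.mk kv.2).getD sv.1 0)
             ++ ("\n").toList,
           st.2 + 1)) (res, 0)).1) []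
  let users := calculate_points iterable
  let res := res ++ ("Individual standings:\n").toList
  let res := ((PySem.List.sorted2 users.items (fun el => -el.2) (fun el => el.1)).foldl
      (fun (st : List Char × Int) u =>
        (st.1 ++ PySem.Int.toChars (st.2 + 1) ++ (". ").toList ++ u.1.toList
           ++ (" -> ").toList ++ PySem.Int.toChars (users.getD u.1 0) ++ ("\n").toList,
         st.2 + 1)) (res, 0)).1
  String.ofList res

-- ===== PORT B =====
-- Source B: 'lines' is the list of emitted lines ('lines += […]' = acc ++ chunk); the totals
-- loop walks reversed(pairs) updating/prepending at index 0, i.e. a right fold.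
def printing_alt (iterable : List (String × List (String × Int))) : String :=
  let lines := iterable.foldl (fun lines kv =>
    let ranked := PySem.List.sorted2 kv.2 (fun el => -el.2) (fun el => el.1)
    (lines ++ [kv.1.toList ++ (": ").toList ++ PySem.Int.toChars (ranked.length : Int)
        ++ (" participants\n").toList])
      ++ (PySem.List.enumerate ranked 1).map (fun p =>
          PySem.Int.toChars p.1 ++ (". ").toList ++ p.2.1.toList ++ (" <::> ").toList
            ++ PySem.Int.toChars p.2.2 ++ ("\n").toList)) []
  let pairs := PySem.List.sorted (iterable.flatMap (fun kv => kv.2)) (fun el => el.1)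
  let totals := pairs.foldr (fun p acc =>
      match acc with
      | [] => [p]
      | q :: t => if q.1 == p.1 then (p.1, p.2 + q.2) :: t else p :: q :: t) []
  let totals := PySem.List.sorted2 totals (fun el => -el.2) (fun el => el.1)
  let lines := lines ++ [("Individual standings:\n").toList]
  let lines := lines ++ (PySem.List.enumerate totals 1).map (fun p =>
      PySem.Int.toChars p.1 ++ (". ").toList ++ p.2.1.toList ++ (" -> ").toList
        ++ PySem.Int.toChars p.2.2 ++ ("\n").toList)
  String.ofList (PySem.Chars.join [] lines)

-- ===== PRECONDITION & SPEC =====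
-- Pre_ excludes association lists with a duplicated key (a duplicated contest name, or a
-- duplicated participant name inside one contest): such lists do not represent a Python
-- dict, the type A's parameter actually has, so A's value on them is not defined.
def Pre_printing (iterable : List (String × List (String × Int))) : Prop :=
  (iterable.map Prod.fst).Nodup ∧ ∀ kv ∈ iterable, (kv.2.map Prod.fst).Nodup
instance (iterable : List (String × List (String × Int))) : Decidable (Pre_printing iterable) := by unfold Pre_printing; infer_instance
def pvWitness_printing : (List (String × List (String × Int))) :=
  [("Math", [("alice", 10), ("bob", 3)]), ("Art", [("bob", 7)])]

def Spec_printing (iterable : List (String × List (String × Int))) (out : String) : Prop := out = printing_alt iterable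
instance (iterable : List (String × List (String × Int))) (out : String) : Decidable (Spec_printing iterable out) := by unfold Spec_printing; infer_instance

-- ===== CLAIM (what is proved, stated in full; the proofs are below) =====
def Claim_equal_printing : Prop := ∀ (iterable : List (String × List (String × Int))), Dom_printing iterable → Pre_printing iterable → Spec_printing iterable (printing iterable)

-- ===== LEMMAS AND PROOFS =====

-- proof-only helpers: the lines/sections both programs emit, the flattened pair list,
-- the per-name point sum, and B's grouping step
def pvLine (mid : List Char) (p : Int × (String × Int)) : List Char :=
  PySem.Int.toChars p.1 ++ (". ").toList ++ p.2.1.toList ++ mid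
    ++ PySem.Int.toChars p.2.2 ++ ("\n").toList

def pvSec (kv : String × List (String × Int)) : List (List Char) :=
  (kv.1.toList ++ (": ").toList ++ PySem.Int.toChars (kv.2.length : Int) ++ (" participants\n").toList)
  :: (PySem.List.enumerate (PySem.List.sorted2 kv.2 (fun el => -el.2) (fun el => el.1)) 1).map
       (pvLine (" <::> ").toList)

def pvPairs (iterable : List (String × List (String × Int))) : List (String × Int) :=
  iterable.flatMap (fun kv => kv.2)

def pvSum (l : List (String × Int)) (n : String) : Int :=
  ((l.filter (fun p => p.1 == n)).map (fun p => p.2)).sum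

def pvGStep (p : String × Int) (acc : List (String × Int)) : List (String × Int) :=
  match acc with
  | [] => [p]
  | q :: t => if q.1 == p.1 then (p.1, p.2 + q.2) :: t else p :: q :: t

def pvK (p : String × Int) : Lex (Int × String) := toLex (-p.2, p.1)

def pvUsers (iterable : List (String × List (String × Int))) : PySem.Dict String Int :=
  iterable.foldl (fun u kv => kv.2.foldl (fun u sv => u.insert sv.1 (u.getD sv.1 0 + sv.2)) u)
    PySem.Dict.empty

lemma pv_join_flatten (xs : List (List Char)) : PySem.Chars.join [] xs = xs.flatten := by
  simp [PySem.Chars.join, List.intercalate]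
  induction xs with
  | nil => simp
  | cons a t ih => cases t <;> simp_all [List.intersperse]

lemma pv_flatten_flatMap {α : Type} (l : List α) (f : α → List (List Char)) :
    (l.flatMap f).flatten = l.flatMap (fun x => (f x).flatten) := by
  induction l with
  | nil => simp
  | cons a t ih => simp [ih]

lemma pv_lookup (l : List (String × Int)) (h : (l.map Prod.fst).Nodup)
    (sv : String × Int) (hm : sv ∈ l) : (PySem.Dict.mk l).getD sv.1 0 = sv.2 := by
  have : (sv.1, sv.2) ∈ (PySem.Dict.mk l).items := by simpa using hm
  exact PySem.Dict.getD_of_mem_items _ this (by simpa using h) 0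

lemma pv_countFold (mid : List Char) (v : (String × Int) → Int)
    (xs : List (String × Int)) (res : List Char) (c : Int) :
    (xs.foldl (fun (st : List Char × Int) sv =>
       (st.1 ++ PySem.Int.toChars (st.2 + 1) ++ (". ").toList ++ sv.1.toList ++ mid
          ++ PySem.Int.toChars (v sv) ++ ("\n").toList, st.2 + 1)) (res, c)).1
    = res ++ ((PySem.List.enumerate xs (c+1)).map
        (fun p => pvLine mid (p.1, (p.2.1, v p.2)))).flatten := by
  induction xs generalizing res c with
  | nil => simp [PySem.List.enumerate_nil]
  | cons a t ih =>
    rw [List.foldl_cons, ih]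
    simp [PySem.List.enumerate_cons, pvLine]

lemma pv_usersEq (iterable : List (String × List (String × Int)))
    (pre : Pre_printing iterable) : calculate_points iterable = pvUsers iterable := by
  unfold calculate_points pvUsers
  apply PySem.List.foldl_congr_mem
  intro acc kv hkv
  apply PySem.List.foldl_congr_mem
  intro d sv hsv
  rw [pv_lookup kv.2 (pre.2 kv hkv) sv hsv]
  by_cases h : d.contains sv.1
  · simp [h, PySem.Dict.modify]
  · simp [h, PySem.Dict.getD_of_not_contains _ _ (by simpa using h)]

lemma pvA_contest (iterable : List (String × List (String × Int)))
    (pre : Pre_printing iterable) :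
    iterable.foldl (fun res kv =>
      let res := res ++ kv.1.toList ++ (": ").toList
        ++ PySem.Int.toChars ((PySem.Dict.mk kv.2).size) ++ (" participants\n").toList
      ((PySem.List.sorted2 kv.2 (fun el => -el.2) (fun el => el.1)).foldl
        (fun (st : List Char × Int) sv =>
          (st.1 ++ PySem.Int.toChars (st.2 + 1) ++ (". ").toList ++ sv.1.toList
             ++ (" <::> ").toList ++ PySem.Int.toChars ((PySem.Dict.mk kv.2).getD sv.1 0)
             ++ ("\n").toList,
           st.2 + 1)) (res, 0)).1) []
    = iterable.flatMap (fun kv => (pvSec kv).flatten) := by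
  have h : ∀ (acc : List Char) kv, kv ∈ iterable →
      (let acc2 := acc ++ kv.1.toList ++ (": ").toList
        ++ PySem.Int.toChars ((PySem.Dict.mk kv.2).size) ++ (" participants\n").toList
      ((PySem.List.sorted2 kv.2 (fun el => -el.2) (fun el => el.1)).foldl
        (fun (st : List Char × Int) sv =>
          (st.1 ++ PySem.Int.toChars (st.2 + 1) ++ (". ").toList ++ sv.1.toList
             ++ (" <::> ").toList ++ PySem.Int.toChars ((PySem.Dict.mk kv.2).getD sv.1 0)
             ++ ("\n").toList,
           st.2 + 1)) (acc2, 0)).1)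
      = acc ++ (pvSec kv).flatten := by
    intro acc kv hkv
    have hc : ∀ (st : List Char × Int) sv,
        sv ∈ PySem.List.sorted2 kv.2 (fun el => -el.2) (fun el => el.1) →
        (st.1 ++ PySem.Int.toChars (st.2 + 1) ++ (". ").toList ++ sv.1.toList
             ++ (" <::> ").toList ++ PySem.Int.toChars ((PySem.Dict.mk kv.2).getD sv.1 0)
             ++ ("\n").toList,
           st.2 + 1)
        = (st.1 ++ PySem.Int.toChars (st.2 + 1) ++ (". ").toList ++ sv.1.toList
             ++ (" <::> ").toList ++ PySem.Int.toChars sv.2 ++ ("\n").toList, st.2 + 1) := by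
      intro st sv hsv
      rw [pv_lookup kv.2 (pre.2 kv hkv) sv
        (((PySem.List.sorted2_perm kv.2 _ _ _).mem_iff).mp hsv)]
    simp only []
    rw [PySem.List.foldl_congr_mem _ _ _ _ hc, pv_countFold (" <::> ").toList Prod.snd]
    simp [pvSec, pvLine, PySem.Dict.size]
    congr 1
    apply List.map_congr_left
    intro p _
    simp [pvLine]
  rw [PySem.List.foldl_congr_mem _ _ _ _ h]
  rw [PySem.List.foldl_append_eq_flatMap (g := fun kv => (pvSec kv).flatten)]
  simp

lemma pv_standings (u : PySem.Dict String Int) (h : u.keys.Nodup) (res : List Char) :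
    ((PySem.List.sorted2 u.items (fun el => -el.2) (fun el => el.1)).foldl
        (fun (st : List Char × Int) p =>
          (st.1 ++ PySem.Int.toChars (st.2 + 1) ++ (". ").toList ++ p.1.toList
             ++ (" -> ").toList ++ PySem.Int.toChars (u.getD p.1 0) ++ ("\n").toList,
           st.2 + 1)) (res, 0)).1
    = res ++ ((PySem.List.enumerate
        (PySem.List.sorted2 u.items (fun el => -el.2) (fun el => el.1)) 1).map
          (pvLine (" -> ").toList)).flatten := by
  have hc : ∀ (st : List Char × Int) p,
      p ∈ PySem.List.sorted2 u.items (fun el => -el.2) (fun el => el.1) →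
      (st.1 ++ PySem.Int.toChars (st.2 + 1) ++ (". ").toList ++ p.1.toList
         ++ (" -> ").toList ++ PySem.Int.toChars (u.getD p.1 0) ++ ("\n").toList, st.2 + 1)
      = (st.1 ++ PySem.Int.toChars (st.2 + 1) ++ (". ").toList ++ p.1.toList
         ++ (" -> ").toList ++ PySem.Int.toChars p.2 ++ ("\n").toList, st.2 + 1) := by
    intro st p hp
    have hm : (p.1, p.2) ∈ u.items := by
      simpa using ((PySem.List.sorted2_perm u.items _ _ _).mem_iff).mp hp
    rw [PySem.Dict.getD_of_mem_items u hm h 0]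
  rw [PySem.List.foldl_congr_mem _ _ _ _ hc, pv_countFold (" -> ").toList Prod.snd]
  simp only [zero_add]

-- ---- the ordering key: sorted2's comparison is the strict order of pvK ----

lemma pv_before_iff (p q : String × Int) :
    ((decide ((fun el : String × Int => -el.2) p < (fun el : String × Int => -el.2) q)
      || (!decide ((fun el : String × Int => -el.2) q < (fun el : String × Int => -el.2) p)
          && decide ((fun el : String × Int => el.1) p < (fun el : String × Int => el.1) q))) = true)
    ↔ pvK p < pvK q := by
  simp [pvK, Prod.Lex.lt_iff]
  constructor
  · rintro (h | ⟨h1, h2⟩)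
    · exact Or.inl (by omega)
    · rcases lt_or_ge (-p.2) (-q.2) with h' | h'
      · exact Or.inl (by omega)
      · exact Or.inr ⟨by omega, h2⟩
  · rintro (h | ⟨h1, h2⟩)
    · exact Or.inl (by omega)
    · exact Or.inr ⟨by omega, h2⟩

lemma pv_insertBy_pairwise (x : String × Int) (ys : List (String × Int))
    (h : ys.Pairwise (fun a b => pvK a ≤ pvK b)) :
    (PySem.List.insertBy
      (fun a b => decide ((fun el : String × Int => -el.2) a < (fun el : String × Int => -el.2) b)
        || (!decide ((fun el : String × Int => -el.2) b < (fun el : String × Int => -el.2) a)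
            && decide ((fun el : String × Int => el.1) a < (fun el : String × Int => el.1) b))) x ys).Pairwise
      (fun a b => pvK a ≤ pvK b) := by
  induction ys with
  | nil => simp [PySem.List.insertBy]
  | cons y t ih =>
    rw [PySem.List.insertBy]
    by_cases hb : pvK x < pvK y
    · rw [if_pos ((pv_before_iff x y).mpr hb)]
      refine List.Pairwise.cons ?_ h
      intro z hz
      rcases List.mem_cons.mp hz with rfl | hz2
      · exact le_of_lt hb
      · exact le_of_lt (lt_of_lt_of_le hb ((List.pairwise_cons.mp h).1 z hz2))
    · rw [if_neg (fun hc => hb ((pv_before_iff x y).mp hc))]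
      refine List.Pairwise.cons ?_ (ih (List.pairwise_cons.mp h).2)
      intro z hz
      rcases (PySem.List.insertBy_mem_iff _ _ _ _).mp hz with rfl | hz2
      · exact le_of_not_gt hb
      · exact (List.pairwise_cons.mp h).1 z hz2

lemma pv_sorted2_pairwise (xs : List (String × Int)) :
    (PySem.List.sorted2 xs (fun el => -el.2) (fun el => el.1)).Pairwise
      (fun a b => pvK a ≤ pvK b) := by
  show (xs.foldl (fun acc x => PySem.List.insertBy _ x acc) []).Pairwise _
  have : ∀ (l : List (String × Int)) (acc : List (String × Int)),
      acc.Pairwise (fun a b => pvK a ≤ pvK b) →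
      (l.foldl (fun acc x => PySem.List.insertBy
        (fun a b => decide ((fun el : String × Int => -el.2) a < (fun el : String × Int => -el.2) b)
          || (!decide ((fun el : String × Int => -el.2) b < (fun el : String × Int => -el.2) a)
              && decide ((fun el : String × Int => el.1) a < (fun el : String × Int => el.1) b))) x acc) acc).Pairwise
        (fun a b => pvK a ≤ pvK b) := by
    intro l
    induction l with
    | nil => exact fun acc h => h
    | cons p t ih => exact fun acc h => ih _ (pv_insertBy_pairwise p acc h)
  exact this xs [] (by simp)

lemma pv_sorted2_eq_of_perm (xs ys : List (String × Int)) (h : xs.Perm ys) :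
    PySem.List.sorted2 xs (fun el => -el.2) (fun el => el.1)
      = PySem.List.sorted2 ys (fun el => -el.2) (fun el => el.1) := by
  have hinj : Function.Injective pvK := by
    intro a b hab
    simp only [pvK, toLex_inj, Prod.mk.injEq] at hab
    exact Prod.ext_iff.mpr ⟨hab.2, by omega⟩
  exact PySem.List.eq_of_perm_of_pairwise_le_of_injective pvK hinj
    (((PySem.List.sorted2_perm xs _ _ _).trans h).trans (PySem.List.sorted2_perm ys _ _ _).symm)
    (pv_sorted2_pairwise xs) (pv_sorted2_pairwise ys)

-- ---- characterisation of A's aggregation dict ----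

lemma pv_sum_cons (p : String × Int) (t : List (String × Int)) (n : String) :
    pvSum (p :: t) n = (if p.1 = n then p.2 else 0) + pvSum t n := by
  by_cases h : p.1 = n <;> simp [pvSum, h]

lemma pv_sum_eq_zero (l : List (String × Int)) (n : String) (h : n ∉ l.map Prod.fst) :
    pvSum l n = 0 := by
  induction l with
  | nil => simp [pvSum]
  | cons p t ih =>
    have h1 : p.1 ≠ n := fun hc => h (by simp [hc])
    have h2 : n ∉ t.map Prod.fst := fun hc => h (by simp [hc])
    rw [pv_sum_cons, ih h2, if_neg h1]
    simp

lemma pv_dict_getD (l : List (String × Int)) (d : PySem.Dict String Int) (n : String) :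
    (l.foldl (fun u sv => u.insert sv.1 (u.getD sv.1 0 + sv.2)) d).getD n 0
      = d.getD n 0 + pvSum l n := by
  induction l generalizing d with
  | nil => simp [pvSum]
  | cons p t ih =>
    rw [List.foldl_cons, ih, pv_sum_cons, PySem.Dict.getD_insert]
    by_cases h : n = p.1
    · rw [if_pos h, if_pos h.symm]
      subst h
      ring
    · rw [if_neg h, if_neg (fun hc => h hc.symm)]; ring

lemma pv_users_pairs (iterable : List (String × List (String × Int))) :
    pvUsers iterable
      = (pvPairs iterable).foldl (fun u sv => u.insert sv.1 (u.getD sv.1 0 + sv.2))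
          PySem.Dict.empty := by
  unfold pvUsers pvPairs
  generalize (PySem.Dict.empty : PySem.Dict String Int) = d
  induction iterable generalizing d with
  | nil => simp
  | cons kv t ih => simp [List.foldl_append, ih]

lemma pv_users_keys_nodup (iterable : List (String × List (String × Int))) :
    (pvUsers iterable).keys.Nodup := by
  rw [pv_users_pairs]
  exact PySem.Dict.nodup_keys_foldl_insert_key (pvPairs iterable) Prod.fst
    (fun u sv => u.getD sv.1 0 + sv.2) PySem.Dict.empty (by simp)

lemma pv_users_mem_items (iterable : List (String × List (String × Int))) (n : String) (v : Int) :
    (n, v) ∈ (pvUsers iterable).items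
      ↔ n ∈ (pvPairs iterable).map Prod.fst ∧ v = pvSum (pvPairs iterable) n := by
  have hnd := pv_users_keys_nodup iterable
  have hkeys : ∀ m, m ∈ (pvUsers iterable).keys ↔ m ∈ (pvPairs iterable).map Prod.fst := by
    intro m
    rw [pv_users_pairs, PySem.Dict.keys_foldl_insert_key]
    simp [PySem.Set.mem_update, PySem.Dict.empty]
  have hget : ∀ m, (pvUsers iterable).getD m 0 = pvSum (pvPairs iterable) m := by
    intro m
    rw [pv_users_pairs, pv_dict_getD, PySem.Dict.getD_empty]
    ring
  rw [PySem.Dict.items_eq_map_keys _ hnd 0]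
  constructor
  · intro h
    rcases List.mem_map.mp h with ⟨k, hk, hkeq⟩
    injection hkeq with h1 h2
    subst h1; subst h2
    exact ⟨(hkeys k).mp hk, (hget k)⟩
  · rintro ⟨hn, rfl⟩
    exact List.mem_map.mpr ⟨n, (hkeys n).mpr hn, by rw [hget n]⟩

-- ---- characterisation of B's sort-then-scan grouping ----

lemma pv_group_head (l : List (String × Int)) (q : String × Int) (G : List (String × Int))
    (h : l.foldr pvGStep [] = q :: G) : ∃ p t, l = p :: t ∧ q.1 = p.1 := by
  cases l with
  | nil => simp at h
  | cons p t =>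
    refine ⟨p, t, rfl, ?_⟩
    rw [List.foldr_cons] at h
    cases ht : t.foldr pvGStep [] with
    | nil =>
      rw [ht] at h
      simp only [pvGStep] at h
      obtain ⟨h1, -⟩ := List.cons_eq_cons.mp h
      rw [← h1]
    | cons r G' =>
      rw [ht] at h
      simp only [pvGStep] at h
      by_cases hr : (r.1 == p.1) = true
      · rw [if_pos hr] at h
        obtain ⟨h1, -⟩ := List.cons_eq_cons.mp h
        rw [← h1]
      · rw [if_neg hr] at h
        obtain ⟨h1, -⟩ := List.cons_eq_cons.mp h
        rw [← h1]

lemma pv_group_spec (l : List (String × Int)) (hs : l.Pairwise (fun a b => a.1 ≤ b.1)) :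
    ((l.foldr pvGStep []).map Prod.fst).Nodup
    ∧ (∀ n, n ∈ (l.foldr pvGStep []).map Prod.fst ↔ n ∈ l.map Prod.fst)
    ∧ (∀ q ∈ l.foldr pvGStep [], q.2 = pvSum l q.1) := by
  induction l with
  | nil => simp
  | cons p t ih =>
    obtain ⟨hp, ht⟩ := List.pairwise_cons.mp hs
    obtain ⟨ihnd, ihmem, ihsum⟩ := ih ht
    rw [List.foldr_cons]
    cases hGt : t.foldr pvGStep [] with
    | nil =>
      have htnil : t = [] := by
        cases t with
        | nil => rfl
        | cons a b =>
          exfalso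
          have hmem := (ihmem a.1).mpr (by simp)
          rw [hGt] at hmem
          simp at hmem
      subst htnil
      simp [pvGStep, pvSum]
    | cons q G' =>
      rw [hGt] at ihnd ihmem ihsum
      have hqmem : q.1 ∈ t.map Prod.fst := (ihmem q.1).mp (by simp)
      simp only [pvGStep]
      by_cases hq : (q.1 == p.1) = true
      · replace hq : q.1 = p.1 := by simpa using hq
        rw [if_pos (by simp [hq])]
        refine ⟨?_, ?_, ?_⟩
        · simpa [List.map_cons, hq] using ihnd
        · intro n
          simp only [List.map_cons, List.mem_cons]
          constructor
          · rintro (rfl | h)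
            · exact Or.inr (hq ▸ hqmem)
            · exact Or.inr ((ihmem n).mp (by simp [h]))
          · rintro (rfl | h)
            · exact Or.inl rfl
            · have h' := (ihmem n).mpr h
              simp only [List.map_cons, List.mem_cons] at h'
              rcases h' with h' | h'
              · exact Or.inl (h' ▸ hq ▸ rfl)
              · exact Or.inr h'
        · intro r hr
          rcases List.mem_cons.mp hr with rfl | hr2
          · have hq2 := ihsum q (by simp)
            rw [hq] at hq2
            simp only []
            rw [pv_sum_cons, if_pos rfl, ← hq2]
          · have h1 := ihsum r (by simp [hr2])
            have hr1 : r.1 ∈ G'.map Prod.fst := List.mem_map.mpr ⟨r, hr2, rfl⟩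
            have hne : r.1 ≠ p.1 := by
              rw [← hq]
              intro hcon
              simp only [List.map_cons] at ihnd
              exact (List.nodup_cons.mp ihnd).1 (hcon ▸ hr1)
            rw [pv_sum_cons, if_neg (fun hc => hne hc.symm), h1]
            ring
      · replace hq : q.1 ≠ p.1 := by simpa using hq
        rw [if_neg (by simpa using hq)]
        have hpt : p.1 ∉ t.map Prod.fst := by
          intro hmem
          obtain ⟨p', t', rfl, hq1⟩ := pv_group_head t q G' hGt
          have h1 : p.1 ≤ q.1 := by
            rw [hq1]
            exact hp p' (by simp)
          have h2 : q.1 ≤ p.1 := by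
            rcases List.mem_map.mp hmem with ⟨r, hr, hre⟩
            rcases List.mem_cons.mp hr with rfl | hr'
            · rw [hq1, hre]
            · have h3 := (List.pairwise_cons.mp ht).1 r hr'
              rw [hq1, ← hre]
              exact h3
          exact hq (le_antisymm h2 h1)
        refine ⟨?_, ?_, ?_⟩
        · refine List.nodup_cons.mpr ⟨?_, ihnd⟩
          intro hc
          simp only [List.map_cons] at hc ⊢
          exact hpt ((ihmem p.1).mp hc)
        · intro n
          simp only [List.map_cons, List.mem_cons]
          constructor
          · rintro (rfl | h)
            · exact Or.inl rfl
            · have h' := (ihmem n).mp (by simpa using h)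
              exact Or.inr h'
          · rintro (rfl | h)
            · exact Or.inl rfl
            · have h' := (ihmem n).mpr h
              simp only [List.map_cons, List.mem_cons] at h'
              exact Or.inr (by simpa using h')
        · intro r hr
          rcases List.mem_cons.mp hr with rfl | hr2
          · rw [pv_sum_cons, if_pos rfl, pv_sum_eq_zero t r.1 hpt]
            ring
          · have h1 := ihsum r hr2
            have hne : r.1 ≠ p.1 := by
              intro hc
              exact hpt (hc ▸ ((ihmem r.1).mp (List.mem_map.mpr ⟨r, hr2, rfl⟩)))
            rw [pv_sum_cons, if_neg (fun hc => hne hc.symm), h1]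
            ring

-- ---- the two aggregates are permutations of each other ----

lemma pv_totals_perm (iterable : List (String × List (String × Int))) :
    ((PySem.List.sorted (pvPairs iterable) (fun el => el.1)).foldr pvGStep []).Perm
      (pvUsers iterable).items := by
  set l := PySem.List.sorted (pvPairs iterable) (fun el => el.1) with hl
  have hperm : l.Perm (pvPairs iterable) := PySem.List.sorted_perm _ _ _
  have hs : l.Pairwise (fun a b => a.1 ≤ b.1) :=
    PySem.List.sorted_pairwise (pvPairs iterable) (fun el => el.1)
  obtain ⟨hnd, hmem, hsum⟩ := pv_group_spec l hs
  have hsumeq : ∀ n, pvSum l n = pvSum (pvPairs iterable) n := by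
    intro n
    exact List.Perm.sum_eq ((hperm.filter _).map _)
  have hmemeq : ∀ n, n ∈ l.map Prod.fst ↔ n ∈ (pvPairs iterable).map Prod.fst :=
    fun n => (hperm.map Prod.fst).mem_iff
  have hGmem : ∀ q : String × Int, q ∈ l.foldr pvGStep []
      ↔ q.1 ∈ (pvPairs iterable).map Prod.fst ∧ q.2 = pvSum (pvPairs iterable) q.1 := by
    intro q
    constructor
    · intro hq
      refine ⟨(hmemeq q.1).mp ((hmem q.1).mp (List.mem_map.mpr ⟨q, hq, rfl⟩)), ?_⟩
      rw [hsum q hq, hsumeq]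
    · rintro ⟨hn, hv⟩
      have : q.1 ∈ (l.foldr pvGStep []).map Prod.fst := (hmem q.1).mpr ((hmemeq q.1).mpr hn)
      obtain ⟨r, hr, hre⟩ := List.mem_map.mp this
      have hrq : r = q := by
        have h2 := hsum r hr
        rw [hsumeq] at h2
        exact Prod.ext_iff.mpr ⟨hre, by rw [h2, hre, ← hv]⟩
      exact hrq ▸ hr
  apply (List.perm_ext_iff_of_nodup (List.Nodup.of_map Prod.fst hnd)
    (List.Nodup.of_map Prod.fst (by
      have := pv_users_keys_nodup iterable
      simpa [PySem.Dict.keys] using this))).mpr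
  intro q
  rw [hGmem q]
  cases q with
  | mk n v => rw [pv_users_mem_items]

-- ===== VERDICT (by name: the statement is the Claim_ definition above) =====
theorem printing_spec : Claim_equal_printing := by
  intro iterable _ pre
  unfold Spec_printing printing printing_alt
  simp only []
  rw [pvA_contest iterable pre, pv_usersEq iterable pre]
  rw [pv_standings _ (pv_users_keys_nodup iterable)]
  -- B's report fold is the same flatMap of sections
  have hBfold : iterable.foldl (fun lines kv =>
      (lines ++ [kv.1.toList ++ (": ").toList
          ++ PySem.Int.toChars (((PySem.List.sorted2 kv.2 (fun el => -el.2) (fun el => el.1)).length : Int))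
          ++ (" participants\n").toList])
        ++ (PySem.List.enumerate (PySem.List.sorted2 kv.2 (fun el => -el.2) (fun el => el.1)) 1).map (fun p =>
            PySem.Int.toChars p.1 ++ (". ").toList ++ p.2.1.toList ++ (" <::> ").toList
              ++ PySem.Int.toChars p.2.2 ++ ("\n").toList)) []
      = iterable.flatMap pvSec := by
    have hstep : (fun (lines : List (List Char)) (kv : String × List (String × Int)) =>
        (lines ++ [kv.1.toList ++ (": ").toList
            ++ PySem.Int.toChars (((PySem.List.sorted2 kv.2 (fun el => -el.2) (fun el => el.1)).length : Int))
            ++ (" participants\n").toList])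
          ++ (PySem.List.enumerate (PySem.List.sorted2 kv.2 (fun el => -el.2) (fun el => el.1)) 1).map (fun p =>
              PySem.Int.toChars p.1 ++ (". ").toList ++ p.2.1.toList ++ (" <::> ").toList
                ++ PySem.Int.toChars p.2.2 ++ ("\n").toList))
        = fun lines kv => lines ++ pvSec kv := by
      funext lines kv
      rw [(PySem.List.sorted2_perm kv.2 (fun el => -el.2) (fun el => el.1) false).length_eq]
      simp [pvSec, pvLine]
    rw [hstep, PySem.List.foldl_append_eq_flatMap (g := pvSec)]
    simp
  rw [hBfold]
  -- the two standings lists coincide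
  have hsorted : PySem.List.sorted2 (pvUsers iterable).items (fun el => -el.2) (fun el => el.1)
      = PySem.List.sorted2
          ((PySem.List.sorted (pvPairs iterable) (fun el => el.1)).foldr pvGStep [])
          (fun el => -el.2) (fun el => el.1) :=
    pv_sorted2_eq_of_perm _ _ (pv_totals_perm iterable).symm
  rw [pv_join_flatten]
  simp only [pvPairs] at hsorted
  rw [show (fun (p : String × Int) (acc : List (String × Int)) =>
      match acc with
      | [] => [p]
      | q :: t => if q.1 == p.1 then (p.1, p.2 + q.2) :: t else p :: q :: t) = pvGStep from rfl]
  rw [← hsorted]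
  apply congrArg
  simp only [List.flatten_append, List.flatten_cons, pv_flatten_flatMap, List.append_assoc]
  apply congrArg
  apply congrArg
  congr 1
  simp [pvLine]
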